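-- pv_equiv track=rewrite | github.com/007HarshChaudhary/Google-Coding-Questions | Henchmen_FOO.py | stingy
-- ===== SOURCE A (Python) =====
-- def stingy(total_lambs):
--     """
--     Return: the number of henchmen sharing the LAMBs
--         if as stingy as possible.
--     """
--     num = 1
--     last = 0
--     cur = 1
--     total_lambs -= 1
--     while total_lambs > 0:
--         if total_lambs < last + cur:
--             break
--         num += 1
--         cur, last = cur + last, cur
--         total_lambs -= cur
--
--     return num
-- ===== SOURCE B (Python) =====
-- def stingy(total_lambs):
--     """
--     Return: the number of henchmen sharing the LAMBs
--         if as stingy as possible.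
--     """
--     # Table of cumulative stingy payouts: prefix sums of 1, 1, 2, 3, 5, ...
--     cumsums = [1]
--     last = 1
--     a, b = 0, 1
--     while last <= total_lambs:
--         a, b = b, a + b
--         last += b
--         cumsums.append(last)
--     # bisect_right(cumsums, total_lambs): how many cumulative payouts fit
--     lo, hi = 0, len(cumsums)
--     while lo < hi:
--         mid = (lo + hi) // 2
--         if cumsums[mid] <= total_lambs:
--             lo = mid + 1
--         else:
--             hi = mid
--     return max(1, lo)
-- ===== Notes on version B (the rewrite author's own statement) =====
-- stated objective: alternative
-- what changed: A's single running-remainder loop (decrementing total_lambs by successive Fibonacci payouts) is replaced by building a table of cumulative payouts and counting how many fit with a hand-written bisect_right binary search, returning max(1, count).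
import Mathlib
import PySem

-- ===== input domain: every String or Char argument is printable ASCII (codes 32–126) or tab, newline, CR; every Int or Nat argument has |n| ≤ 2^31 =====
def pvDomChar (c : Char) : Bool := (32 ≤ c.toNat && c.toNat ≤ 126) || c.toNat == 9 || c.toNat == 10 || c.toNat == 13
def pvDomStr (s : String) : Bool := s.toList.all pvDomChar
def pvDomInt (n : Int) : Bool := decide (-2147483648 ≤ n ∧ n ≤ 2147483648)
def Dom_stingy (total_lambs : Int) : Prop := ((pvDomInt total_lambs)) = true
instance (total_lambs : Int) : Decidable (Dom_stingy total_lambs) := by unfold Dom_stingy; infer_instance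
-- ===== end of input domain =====

-- B replaces A's inline running-remainder Fibonacci scan by building a table of
-- cumulative payouts and binary-searching it (alternative decomposition, same cost).


-- ===== PORT A =====
-- A's while-loop; the conjunct 0 < last + cur is a pure totality guard (it holds at
-- every state reachable from stingy's initial state, where last = 0, cur = 1).
def stingyAux (t last cur num : Int) : Int :=
  if _h : 0 < t ∧ last + cur ≤ t ∧ 0 < last + cur then
    stingyAux (t - (cur + last)) cur (cur + last) (num + 1)
  else num
termination_by t.toNat
decreasing_by omega

def stingy (total_lambs : Int) : Int :=
  stingyAux (total_lambs - 1) 0 1 1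

-- ===== PORT B =====
-- Source B's table-building loop; 0 ≤ a ∧ 0 < b is a pure totality guard (holds at every
-- state reachable from the initial a = 0, b = 1).
def buildAux (x : Int) (cumsums : List Int) (last a b : Int) : List Int :=
  if _h : last ≤ x ∧ 0 ≤ a ∧ 0 < b then
    buildAux x (cumsums ++ [last + (a + b)]) (last + (a + b)) b (a + b)
  else cumsums
termination_by (x + 1 - last).toNat
decreasing_by omega

-- Source B's hand-written bisect_right loop
def bsearch (l : List Int) (x : Int) (lo hi : Nat) : Nat :=
  if _h : lo < hi then
    if l.getD ((lo + hi) / 2) 0 ≤ x then bsearch l x ((lo + hi) / 2 + 1) hi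
    else bsearch l x lo ((lo + hi) / 2)
  else lo
termination_by hi - lo
decreasing_by all_goals omega

def stingy_alt (total_lambs : Int) : Int :=
  let cumsums := buildAux total_lambs [1] 1 0 1
  max 1 (Int.ofNat (bsearch cumsums total_lambs 0 cumsums.length))

-- ===== PRECONDITION & SPEC =====
def Spec_stingy (total_lambs : Int) (out : Int) : Prop := out = stingy_alt total_lambs
instance (total_lambs : Int) (out : Int) : Decidable (Spec_stingy total_lambs out) := by unfold Spec_stingy; infer_instance

-- ===== CLAIM (what is proved, stated in full; the proofs are below) =====
def Claim_equal_stingy : Prop := ∀ (total_lambs : Int), Dom_stingy total_lambs → Spec_stingy total_lambs (stingy total_lambs)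

-- ===== LEMMAS AND PROOFS =====

lemma stingyAux_shift (t l c num : Int) : stingyAux t l c num = num + stingyAux t l c 0 := by
  generalize hn : t.toNat = n
  induction n using Nat.strong_induction_on generalizing t l c num with
  | _ n ih =>
    conv_lhs => rw [stingyAux]
    conv_rhs => rw [stingyAux]
    split_ifs with h
    · rw [ih (t - (c + l)).toNat (by omega) (t - (c + l)) c (c + l) (num + 1) rfl]
      rw [ih (t - (c + l)).toNat (by omega) (t - (c + l)) c (c + l) (0 + 1) rfl]
      ring
    · simp

lemma stingyAux_ge (t l c num : Int) : num ≤ stingyAux t l c num := by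
  generalize hn : t.toNat = n
  induction n using Nat.strong_induction_on generalizing t l c num with
  | _ n ih =>
    rw [stingyAux]
    split_ifs with h
    · have := ih (t - (c + l)).toNat (by omega) (t - (c + l)) c (c + l) (num + 1) rfl
      omega
    · omega

lemma build_key (x : Int) : ∀ (n : Nat) (cs : List Int) (last a b : Int),
    (x + 1 - last).toNat = n → 0 ≤ a → 0 < b →
    ((buildAux x cs last a b).countP (fun s => decide (s ≤ x)) : Int)
      = (cs.countP (fun s => decide (s ≤ x)) : Int) + stingyAux (x - last) a b 0 := by
  intro n
  induction n using Nat.strong_induction_on with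
  | _ n ih =>
    intro cs last a b hn ha hb
    rw [buildAux]
    split_ifs with h
    · have hlast : last ≤ x := h.1
      have hih := ih (x + 1 - (last + (a + b))).toNat (by omega)
        (cs ++ [last + (a + b)]) (last + (a + b)) b (a + b) rfl hb.le (by omega)
      rw [hih, List.countP_append]
      by_cases hc : last + (a + b) ≤ x
      · have hR : stingyAux (x - last) a b 0
            = 1 + stingyAux (x - (last + (a + b))) b (a + b) 0 := by
          conv_lhs => rw [stingyAux]
          rw [dif_pos ⟨by omega, by omega, by omega⟩, stingyAux_shift,
            show x - last - (b + a) = x - (last + (a + b)) by ring,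
            show b + a = a + b by ring]
          ring
        have hcp : [last + (a + b)].countP (fun s => decide (s ≤ x)) = 1 := by
          simp [hc]
        rw [hR, hcp]
        push_cast
        ring
      · have hz1 : stingyAux (x - (last + (a + b))) b (a + b) 0 = 0 := by
          rw [stingyAux, dif_neg (by omega)]
        have hz2 : stingyAux (x - last) a b 0 = 0 := by
          rw [stingyAux, dif_neg (by omega)]
        have hcp : [last + (a + b)].countP (fun s => decide (s ≤ x)) = 0 := by
          simp [hc]
        rw [hz1, hz2, hcp]
        push_cast
        ring
    · have hz : stingyAux (x - last) a b 0 = 0 := by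
        rw [stingyAux, dif_neg (by omega)]
      rw [hz]; ring

lemma build_sorted (x : Int) : ∀ (n : Nat) (cs : List Int) (last a b : Int),
    (x + 1 - last).toNat = n → (∀ s ∈ cs, s ≤ last) → cs.Pairwise (· ≤ ·) →
    (buildAux x cs last a b).Pairwise (· ≤ ·) := by
  intro n
  induction n using Nat.strong_induction_on with
  | _ n ih =>
    intro cs last a b hn hbound hsort
    rw [buildAux]
    split_ifs with h
    · refine ih (x + 1 - (last + (a + b))).toNat (by omega) _ _ b (a + b) rfl ?_ ?_
      · intro s hs
        rcases List.mem_append.1 hs with hs | hs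
        · have := hbound s hs; omega
        · simp at hs; omega
      · rw [List.pairwise_append]
        refine ⟨hsort, by simp, ?_⟩
        intro s hs t ht
        simp at ht
        have := hbound s hs
        omega
    · exact hsort

lemma countP_eq_of_prefix (l : List Int) (x : Int) (n : Nat) (hn : n ≤ l.length)
    (h1 : ∀ i < n, l.getD i 0 ≤ x) (h2 : ∀ i, n ≤ i → i < l.length → x < l.getD i 0) :
    l.countP (fun s => decide (s ≤ x)) = n := by
  have hsplit := List.take_append_drop n l
  have htake : (l.take n).countP (fun s => decide (s ≤ x)) = n := by
    have hall : ∀ a ∈ l.take n, (fun s => decide (s ≤ x)) a = true := by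
      intro a ha
      obtain ⟨i, hi, rfl⟩ := List.mem_iff_getElem.1 ha
      have hlen : i < (l.take n).length := hi
      rw [List.length_take] at hlen
      have h := h1 i (by omega)
      rw [List.getD_eq_getElem l 0 (by omega)] at h
      simpa [List.getElem_take] using h
    rw [List.countP_eq_length.2 hall, List.length_take, Nat.min_eq_left hn]
  have hdrop : (l.drop n).countP (fun s => decide (s ≤ x)) = 0 := by
    rw [List.countP_eq_zero]
    intro a ha
    obtain ⟨i, hi, rfl⟩ := List.mem_iff_getElem.1 ha
    have hlen : i < (l.drop n).length := hi
    rw [List.length_drop] at hlen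
    have h := h2 (n + i) (by omega) (by omega)
    rw [List.getD_eq_getElem l 0 (by omega)] at h
    simp only [List.getElem_drop]
    simpa using not_le.2 h
  conv_lhs => rw [← hsplit]
  rw [List.countP_append, htake, hdrop]
  omega

lemma pairwise_getD_mono (l : List Int) (hl : l.Pairwise (· ≤ ·)) :
    ∀ i j : Nat, i ≤ j → j < l.length → l.getD i 0 ≤ l.getD j 0 := by
  intro i j hij hj
  rcases Nat.eq_or_lt_of_le hij with rfl | hlt
  · exact le_refl _
  · have hi : i < l.length := by omega
    have := (List.pairwise_iff_getElem.1 hl) i j hi hj hlt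
    rw [List.getD_eq_getElem l 0 hi, List.getD_eq_getElem l 0 hj]
    exact this

lemma bsearch_correct (l : List Int) (x : Int) (hl : l.Pairwise (· ≤ ·)) :
    ∀ (n lo hi : Nat), hi - lo = n → lo ≤ hi → hi ≤ l.length →
    (∀ i < lo, l.getD i 0 ≤ x) → (∀ i, hi ≤ i → i < l.length → x < l.getD i 0) →
    bsearch l x lo hi = l.countP (fun s => decide (s ≤ x)) := by
  have hmono := pairwise_getD_mono l hl
  intro n
  induction n using Nat.strong_induction_on with
  | _ n ih =>
    intro lo hi hn hlh hhl hbelow habove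
    rw [bsearch]
    split_ifs with h hle
    · refine ih (hi - ((lo + hi) / 2 + 1)) (by omega) _ _ rfl (by omega) hhl ?_ habove
      intro i hi'
      rcases Nat.lt_or_ge i lo with hc | hc
      · exact hbelow i hc
      · exact le_trans (hmono i ((lo + hi) / 2) (by omega) (by omega)) hle
    · refine ih ((lo + hi) / 2 - lo) (by omega) _ _ rfl (by omega) (by omega) hbelow ?_
      intro i hi1 hi2
      exact lt_of_lt_of_le (lt_of_not_ge hle) (hmono ((lo + hi) / 2) i hi1 hi2)
    · exact (countP_eq_of_prefix l x lo (by omega) hbelow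
        (fun i h1 h2 => habove i (by omega) h2)).symm

-- ===== VERDICT (by name: the statement is the Claim_ definition above) =====
theorem stingy_spec : Claim_equal_stingy := by
  intro x _
  show stingyAux (x - 1) 0 1 1
      = max 1 (Int.ofNat (bsearch (buildAux x [1] 1 0 1) x 0 (buildAux x [1] 1 0 1).length))
  have hsorted : (buildAux x [1] 1 0 1).Pairwise (· ≤ ·) :=
    build_sorted x (x + 1 - 1).toNat [1] 1 0 1 rfl (by simp) (by simp)
  have hbs : bsearch (buildAux x [1] 1 0 1) x 0 (buildAux x [1] 1 0 1).length
      = (buildAux x [1] 1 0 1).countP (fun s => decide (s ≤ x)) :=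
    bsearch_correct _ x hsorted _ 0 _ rfl (Nat.zero_le _) le_rfl
      (by intro i hi; omega) (by intro i h1 h2; omega)
  have hkey := build_key x (x + 1 - 1).toNat [1] 1 0 1 rfl (by omega) (by omega)
  have hshift := stingyAux_shift (x - 1) 0 1 1
  have hge := stingyAux_ge (x - 1) 0 1 0
  rw [hbs, hshift]
  simp only [Int.ofNat_eq_natCast]
  by_cases hx : 1 ≤ x
  · have hone : (([1].countP (fun s => decide (s ≤ x)) : Nat) : Int) = 1 := by simp [hx]
    rw [hone] at hkey
    rw [hkey, max_eq_right (by omega)]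
  · have hz : stingyAux (x - 1) 0 1 0 = 0 := by
      rw [stingyAux, dif_neg (by omega)]
    have hone : (([1].countP (fun s => decide (s ≤ x)) : Nat) : Int) = 0 := by simp [hx]
    have hcount : (((buildAux x [1] 1 0 1).countP (fun s => decide (s ≤ x)) : Nat) : Int) = 0 := by
      rw [hkey, hone, hz]; ring
    have hcount' : (buildAux x [1] 1 0 1).countP (fun s => decide (s ≤ x)) = 0 := by
      exact_mod_cast hcount
    rw [hz, hcount']
    simp
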